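-- pv_equiv track=rewrite | github.com/Jozkings/advent-of-code-2022 | 17.py | get_starting_position
-- ===== SOURCE A (Python) =====
-- from typing import DefaultDict, List, Tuple, Union
--
-- def get_max_min(tetris: List[List[Tuple[int, int]]]) -> Tuple[int, int]:
--     maxo = max([x for block in tetris for x, _ in block])
--     mino = min([x for block in tetris for x, _ in block])
--     return maxo, mino
--
-- def get_starting_row(new: str, lasts: Union[None, List[List[Tuple[int, int]]]], suter_types: List[str]) -> int:
--     if lasts is None:
--         return 3
--     maxo, _ = get_max_min(lasts)
--     if new in (suter_types[1], suter_types[2]):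
--         return maxo + 6
--     if new == suter_types[0]:
--         return maxo + 4
--     if new == suter_types[3]:
--         return maxo + 7
--     return maxo + 5
--
-- def get_starting_position(last_suters: Union[None, List[List[Tuple[int, int]]]], all_suter_types: List[str],
--                           current_suter: int):
--     coords = []
--     block = all_suter_types[current_suter]
--     row, column = get_starting_row(block, last_suters, all_suter_types), 2
--     for charo in block:
--         if charo == "#":
--             coords.append((row, column))
--             column += 1
--         elif charo == '\n':
--             row -= 1
--             column = 2
--         else:
--             column += 1
--     return coords
-- ===== SOURCE B (Python) =====
-- from typing import List, Tuple, Union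
--
--
-- def get_max_min(tetris: List[List[Tuple[int, int]]]) -> Tuple[int, int]:
--     maxo = max([x for block in tetris for x, _ in block])
--     mino = min([x for block in tetris for x, _ in block])
--     return maxo, mino
--
--
-- def get_starting_row(new: str, lasts: Union[None, List[List[Tuple[int, int]]]], suter_types: List[str]) -> int:
--     if lasts is None:
--         return 3
--     maxo, _ = get_max_min(lasts)
--     if new in (suter_types[1], suter_types[2]):
--         return maxo + 6
--     if new == suter_types[0]:
--         return maxo + 4
--     if new == suter_types[3]:
--         return maxo + 7
--     return maxo + 5
--
--
-- def get_starting_position(last_suters: Union[None, List[List[Tuple[int, int]]]], all_suter_types: List[str],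
--                           current_suter: int):
--     block = all_suter_types[current_suter]
--     start_row = get_starting_row(block, last_suters, all_suter_types)
--     return [(start_row - i, j + 2)
--             for i, line in enumerate(block.split('\n'))
--             for j, ch in enumerate(line)
--             if ch == '#']
-- ===== Notes on version B (the rewrite author's own statement) =====
-- stated objective: simpler
-- what changed: get_starting_position replaces the single-pass mutable row/column state machine over the characters with a split-on-newline plus nested enumerate comprehension, computing each coordinate positionally as (start_row - line_index, char_index + 2); the helpers are kept unchanged.
import Mathlib
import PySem

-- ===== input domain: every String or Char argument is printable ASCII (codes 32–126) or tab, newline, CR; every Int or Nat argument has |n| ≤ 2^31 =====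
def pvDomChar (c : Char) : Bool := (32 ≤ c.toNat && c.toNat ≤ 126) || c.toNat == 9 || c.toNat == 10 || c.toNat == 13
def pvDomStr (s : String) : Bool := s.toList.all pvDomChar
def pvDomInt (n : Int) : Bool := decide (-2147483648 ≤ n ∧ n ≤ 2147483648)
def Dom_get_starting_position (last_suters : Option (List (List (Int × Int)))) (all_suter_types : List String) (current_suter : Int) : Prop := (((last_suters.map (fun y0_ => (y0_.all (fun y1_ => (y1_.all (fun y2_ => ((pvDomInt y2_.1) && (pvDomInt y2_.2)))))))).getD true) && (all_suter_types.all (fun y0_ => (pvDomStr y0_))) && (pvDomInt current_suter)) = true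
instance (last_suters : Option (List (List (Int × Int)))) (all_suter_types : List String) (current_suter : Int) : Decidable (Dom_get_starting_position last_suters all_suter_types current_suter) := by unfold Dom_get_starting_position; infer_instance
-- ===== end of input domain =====

-- B rewrites only get_starting_position: the mutable row/column state machine becomes a
-- split-on-newline + nested-enumerate positional computation; helpers are kept unchanged.

-- ===== PORT A =====
-- Shared helpers (identical in Source A and Source B; B reuses them verbatim).
def get_max_min (tetris : List (List (Int × Int))) : Int × Int :=
  let xs := tetris.flatMap (fun block => block.map (·.1))
  -- max/min of an empty list raise ValueError in Python; Pre_ excludes that case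
  (((PySem.List.max? xs id).getD 0), ((PySem.List.min? xs id).getD 0))

def get_starting_row (new : String) (lasts : Option (List (List (Int × Int)))) (suter_types : List String) : Int :=
  match lasts with
  | none => 3
  | some lasts =>
    let maxo := (get_max_min lasts).1
    -- suter_types[k] out of range raises IndexError in Python; Pre_ excludes those inputs
    if PySem.List.pyGet? suter_types 1 = some new ∨ PySem.List.pyGet? suter_types 2 = some new then maxo + 6
    else if PySem.List.pyGet? suter_types 0 = some new then maxo + 4
    else if PySem.List.pyGet? suter_types 3 = some new then maxo + 7
    else maxo + 5

def get_starting_position (last_suters : Option (List (List (Int × Int)))) (all_suter_types : List String) (current_suter : Int) : List (Int × Int) :=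
  match PySem.List.pyGet? all_suter_types current_suter with
  | none => []  -- IndexError in Python; Pre_ excludes
  | some block =>
    let row0 := get_starting_row block last_suters all_suter_types
    (block.toList.foldl
      (fun (st : List (Int × Int) × Int × Int) charo =>
        let coords := st.1; let row := st.2.1; let column := st.2.2
        if charo = '#' then (coords ++ [(row, column)], row, column + 1)
        else if charo = '\n' then (coords, row - 1, 2)
        else (coords, row, column + 1))
      ([], row0, 2)).1

-- ===== PORT B =====
def get_starting_position_alt (last_suters : Option (List (List (Int × Int)))) (all_suter_types : List String) (current_suter : Int) : List (Int × Int) :=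
  match PySem.List.pyGet? all_suter_types current_suter with
  | none => []  -- IndexError in Python; Pre_ excludes
  | some block =>
    let start_row := get_starting_row block last_suters all_suter_types
    (PySem.List.enumerate (block.toList.splitOn '\n')).flatMap
      (fun il => (PySem.List.enumerate il.2).filterMap
        (fun jc => if jc.2 = '#' then some (start_row - il.1, jc.1 + 2) else none))

-- ===== PRECONDITION & SPEC =====
-- Pre_ excludes exactly the inputs on which the Python A raises: an invalid index
-- current_suter (IndexError), and — when last_suters is a list — an all-empty last_suters
-- (ValueError from max/min of an empty list) or a suter_types list too short for the
-- indices [1],[2],[0],[3] that get_starting_row actually reaches (IndexError).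
def Pre_get_starting_position (last_suters : Option (List (List (Int × Int)))) (all_suter_types : List String) (current_suter : Int) : Prop :=
  (PySem.List.pyGet? all_suter_types current_suter).isSome = true ∧
  ∀ L ∈ last_suters,
    L.flatMap (fun b => b) ≠ [] ∧ 3 ≤ all_suter_types.length ∧
      (all_suter_types[1]? = PySem.List.pyGet? all_suter_types current_suter ∨
       all_suter_types[2]? = PySem.List.pyGet? all_suter_types current_suter ∨
       all_suter_types[0]? = PySem.List.pyGet? all_suter_types current_suter ∨
       4 ≤ all_suter_types.length)
instance (last_suters : Option (List (List (Int × Int)))) (all_suter_types : List String) (current_suter : Int) : Decidable (Pre_get_starting_position last_suters all_suter_types current_suter) := by unfold Pre_get_starting_position; infer_instance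

def pvWitness_get_starting_position : (Option (List (List (Int × Int)))) × List String × Int :=
  (some [[(0, 1)], [(2, 3)]], ["####", "#\n#", ".#.\n###", "##\n##"], 1)

def Spec_get_starting_position (last_suters : Option (List (List (Int × Int)))) (all_suter_types : List String) (current_suter : Int) (out : List (Int × Int)) : Prop := out = get_starting_position_alt last_suters all_suter_types current_suter
instance (last_suters : Option (List (List (Int × Int)))) (all_suter_types : List String) (current_suter : Int) (out : List (Int × Int)) : Decidable (Spec_get_starting_position last_suters all_suter_types current_suter out) := by unfold Spec_get_starting_position; infer_instance

-- ===== CLAIM (what is proved, stated in full; the proofs are below) =====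
def Claim_equal_get_starting_position : Prop := ∀ (last_suters : Option (List (List (Int × Int)))) (all_suter_types : List String) (current_suter : Int), Dom_get_starting_position last_suters all_suter_types current_suter → Pre_get_starting_position last_suters all_suter_types current_suter → Spec_get_starting_position last_suters all_suter_types current_suter (get_starting_position last_suters all_suter_types current_suter)

-- ===== LEMMAS AND PROOFS =====

/-- A's state machine, without the accumulator. -/
def pvLineRows : List Char → Int → Int → List (Int × Int)
  | [], _, _ => []
  | c :: cs, row, col =>
    if c = '#' then (row, col) :: pvLineRows cs row (col + 1)
    else if c = '\n' then pvLineRows cs (row - 1) 2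
    else pvLineRows cs row (col + 1)

/-- Cells of one line, starting at column `col`. -/
def pvLineCells : List Char → Int → Int → List (Int × Int)
  | [], _, _ => []
  | c :: cs, row, col =>
    (if c = '#' then [(row, col)] else []) ++ pvLineCells cs row (col + 1)

/-- Cells of a list of lines, one row per line going down, columns from 2. -/
def pvRows : List (List Char) → Int → List (Int × Int)
  | [], _ => []
  | l :: ls, row => pvLineCells l row 2 ++ pvRows ls (row - 1)

/-- Like `pvRows` but the first line starts at column `col`. -/
def pvRowsFrom : List (List Char) → Int → Int → List (Int × Int)
  | [], _, _ => []
  | l :: ls, row, col => pvLineCells l row col ++ pvRows ls (row - 1)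

theorem pv_foldl_eq_lineRows (cs : List Char) (coords : List (Int × Int)) (row col : Int) :
    (cs.foldl
      (fun (st : List (Int × Int) × Int × Int) charo =>
        let coords := st.1; let row := st.2.1; let column := st.2.2
        if charo = '#' then (coords ++ [(row, column)], row, column + 1)
        else if charo = '\n' then (coords, row - 1, 2)
        else (coords, row, column + 1))
      (coords, row, col)).1 = coords ++ pvLineRows cs row col := by
  induction cs generalizing coords row col with
  | nil => simp [pvLineRows]
  | cons c cs ih =>
    by_cases h1 : c = '#'
    · simp [List.foldl_cons, h1, pvLineRows, ih]
    · by_cases h2 : c = '\n'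
      · simp [List.foldl_cons, h2, pvLineRows, ih]
      · simp [List.foldl_cons, h1, h2, pvLineRows, ih]

theorem pv_lineRows_eq_rowsFrom (cs : List Char) (row col : Int) :
    pvLineRows cs row col = pvRowsFrom (cs.splitOn '\n') row col := by
  induction cs generalizing row col with
  | nil => simp [pvLineRows, List.splitOn_nil, pvRowsFrom, pvRows, pvLineCells]
  | cons c cs ih =>
    have hne : cs.splitOn '\n' ≠ [] := List.splitOnP_ne_nil _ _
    obtain ⟨h, t, hht⟩ := List.exists_cons_of_ne_nil hne
    by_cases h2 : c = '\n'
    · have : (c :: cs).splitOn '\n' = [] :: cs.splitOn '\n' := by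
        simp [List.splitOn, List.splitOnP_cons, h2]
      rw [this, hht]
      simp [pvLineRows, h2, pvRowsFrom, pvLineCells, ih, hht, pvRows]
    · have : (c :: cs).splitOn '\n' = (cs.splitOn '\n').modifyHead (List.cons c) := by
        simp [List.splitOn, List.splitOnP_cons, h2]
      rw [this, hht]
      by_cases h1 : c = '#'
      · simp [pvLineRows, h1, ih, hht, pvRowsFrom, pvLineCells]
      · simp [pvLineRows, h1, h2, ih, hht, pvRowsFrom, pvLineCells]

theorem pv_filterMap_eq_lineCells (line : List Char) (j row : Int) :
    (PySem.List.enumerate line j).filterMap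
      (fun jc => if jc.2 = '#' then some (row, jc.1 + 2) else none)
      = pvLineCells line row (j + 2) := by
  induction line generalizing j with
  | nil => simp [PySem.List.enumerate, pvLineCells]
  | cons c l ih =>
    by_cases h1 : c = '#'
    · simp [PySem.List.enumerate_cons, h1, pvLineCells, ih]
      ring_nf
    · simp [PySem.List.enumerate_cons, h1, pvLineCells, ih]
      ring_nf

theorem pv_flatMap_eq_rows (ls : List (List Char)) (k row : Int) :
    (PySem.List.enumerate ls k).flatMap
      (fun il => (PySem.List.enumerate il.2).filterMap
        (fun jc => if jc.2 = '#' then some (row - il.1, jc.1 + 2) else none))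
      = pvRows ls (row - k) := by
  induction ls generalizing k with
  | nil => simp [PySem.List.enumerate, pvRows]
  | cons l ls ih =>
    rw [PySem.List.enumerate_cons, List.flatMap_cons, ih]
    have h1 := pv_filterMap_eq_lineCells l 0 (row - k)
    simp only [zero_add] at h1
    rw [pvRows, h1]
    congr 1
    ring_nf

theorem pv_rowsFrom_two (ls : List (List Char)) (row : Int) (h : ls ≠ []) :
    pvRowsFrom ls row 2 = pvRows ls row := by
  obtain ⟨l, t, rfl⟩ := List.exists_cons_of_ne_nil h
  simp [pvRowsFrom, pvRows]

-- ===== VERDICT (by name: the statement is the Claim_ definition above) =====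
theorem get_starting_position_spec : Claim_equal_get_starting_position := by
  intro last_suters all_suter_types current_suter _hdom hpre
  unfold Spec_get_starting_position
  unfold get_starting_position get_starting_position_alt
  unfold Pre_get_starting_position at hpre
  cases hget : PySem.List.pyGet? all_suter_types current_suter with
  | none => rw [hget] at hpre
  | some block =>
    dsimp only
    have hne : block.toList.splitOn '\n' ≠ [] := by
      rw [List.splitOn]; exact List.splitOnP_ne_nil _ _
    rw [pv_foldl_eq_lineRows, pv_lineRows_eq_rowsFrom, pv_rowsFrom_two _ _ hne]
    have := pv_flatMap_eq_rows (block.toList.splitOn '\n') 0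
      (get_starting_row block last_suters all_suter_types)
    simp only [sub_zero] at this
    rw [List.nil_append, this]
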